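-- pv_equiv track=rewrite | github.com/messoem/tms_nets | tms-nets/utils.py | e_param
-- ===== SOURCE A (Python) =====
-- def e_param(t, m, s):
--     n = t + s
--     x = s
--     if n < x:
--         return None
--     result = [1] * x
--     remaining = n - x
--     i = 0
--     while remaining > 0:
--         result[i] += 1
--         remaining -= 1
--         i = (i + 1) % x
--     return result
-- ===== SOURCE B (Python) =====
-- def e_param(t, m, s):
--     if t < 0:
--         return None
--     if t == 0:
--         return [1] * s
--     q, r = divmod(t, s)
--     return [q + 2] * r + [q + 1] * (s - r)
-- ===== Notes on version B (the rewrite author's own statement) =====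
-- stated objective: faster
-- what changed: Replaces the one-by-one cyclic distribution loop (t iterations) with a closed-form divmod split: the first t%s buckets get 1+t//s+1, the rest 1+t//s; t==0 returns [1]*s directly (nothing to distribute).
import Mathlib
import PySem

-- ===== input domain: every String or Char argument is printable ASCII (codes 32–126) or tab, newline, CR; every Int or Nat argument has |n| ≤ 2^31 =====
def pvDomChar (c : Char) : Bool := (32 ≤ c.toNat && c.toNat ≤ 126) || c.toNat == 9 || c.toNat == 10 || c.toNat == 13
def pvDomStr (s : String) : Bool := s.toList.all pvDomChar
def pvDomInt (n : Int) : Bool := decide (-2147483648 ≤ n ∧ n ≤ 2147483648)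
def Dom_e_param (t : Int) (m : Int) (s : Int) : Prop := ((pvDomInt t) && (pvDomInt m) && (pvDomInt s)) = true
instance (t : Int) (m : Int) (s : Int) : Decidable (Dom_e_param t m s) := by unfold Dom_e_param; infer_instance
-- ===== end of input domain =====

-- B replaces A's one-by-one cyclic distribution loop by a closed-form divmod split (objective: faster, O(s) instead of O(t+s)).

-- ===== PORT A =====
-- the while-loop: fuel = remaining.toNat (the loop decrements `remaining` by exactly 1 per iteration);
-- `result[i] += 1` raises IndexError when i is out of range → none
def eLoopA : Nat → List Int → Int → Int → Option (List Int)
  | 0, result, _, _ => some result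
  | fuel + 1, result, i, x =>
    match PySem.List.pyGet? result i with
    | none => none
    | some v => eLoopA fuel (result.set i.toNat (v + 1)) (PySem.Int.mod (i + 1) x) x

def e_param (t : Int) (m : Int) (s : Int) : Option (List Int) :=
  let n := t + s
  let x := s
  if n < x then none
  else
    let result := List.replicate x.toNat (1 : Int)  -- [1] * x (empty for x ≤ 0, as in Python)
    let remaining := n - x
    eLoopA remaining.toNat result 0 x

-- ===== PORT B =====
def e_param_alt (t : Int) (m : Int) (s : Int) : Option (List Int) :=
  if t < 0 then none
  else if t = 0 then some (List.replicate s.toNat (1 : Int))  -- [1] * s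
  else
    match PySem.Int.divmod? t s with
    | none => none  -- ZeroDivisionError (excluded by Pre_)
    | some (q, r) => some (List.replicate r.toNat (q + 2) ++ List.replicate (s - r).toNat (q + 1))

-- ===== PRECONDITION & SPEC =====
-- Pre_ excludes exactly the inputs on which A raises: t > 0 with s ≤ 0 (A's `result[i] += 1`
-- hits an empty/never-long-enough list and raises IndexError).
def Pre_e_param (t : Int) (m : Int) (s : Int) : Prop := t ≤ 0 ∨ 0 < s
instance (t : Int) (m : Int) (s : Int) : Decidable (Pre_e_param t m s) := by unfold Pre_e_param; infer_instance

def pvWitness_e_param : Int × Int × Int := (7, 0, 3)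

def Spec_e_param (t : Int) (m : Int) (s : Int) (out : Option (List Int)) : Prop := out = e_param_alt t m s
instance (t : Int) (m : Int) (s : Int) (out : Option (List Int)) : Decidable (Spec_e_param t m s out) := by unfold Spec_e_param; infer_instance

-- ===== CLAIM (what is proved, stated in full; the proofs are below) =====
def Claim_equal_e_param : Prop := ∀ (t : Int) (m : Int) (s : Int), Dom_e_param t m s → Pre_e_param t m s → Spec_e_param t m s (e_param t m s)

-- ===== LEMMAS AND PROOFS =====

-- running the loop for r ≤ |todo| steps just increments the first r elements of todo
theorem eLoopA_partial (x : Int) (r : Nat) : ∀ (L1 L2 : List Int), r ≤ L2.length →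
    ((L1 ++ L2).length : Int) = x →
    eLoopA r (L1 ++ L2) L1.length x =
      some (L1 ++ (L2.take r).map (· + 1) ++ L2.drop r) := by
  induction r with
  | zero => intro L1 L2 _ _; simp [eLoopA]
  | succ r ih =>
    intro L1 L2 hr hx
    match L2 with
    | [] => simp at hr
    | a :: L2' =>
      have hr' : r ≤ L2'.length := by simpa using hr
      simp only [List.length_append, List.length_cons] at hx
      simp only [eLoopA, PySem.List.pyGet?_append_length]
      have hset : (L1 ++ a :: L2').set ((L1.length : Int)).toNat (a + 1)
          = (L1 ++ [a + 1]) ++ L2' := by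
        simp [List.append_assoc]
      rw [hset]
      rcases Nat.eq_zero_or_pos r with hr0 | hrpos
      · subst hr0; simp [eLoopA]
      · have hlen : (L1.length : Int) + 1 < x := by omega
        have hmod : PySem.Int.mod ((L1.length : Int) + 1) x = (L1.length : Int) + 1 := by
          rw [PySem.Int.mod_eq_emod_of_pos (by omega)]
          exact Int.emod_eq_of_lt (by omega) hlen
        have h1 : ((L1 ++ [a + 1]).length : Int) = (L1.length : Int) + 1 := by simp
        rw [hmod, ← h1, ih (L1 ++ [a + 1]) L2' hr'
          (by simp only [List.length_append, List.length_cons, List.length_nil] at hx ⊢; omega)]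
        simp [List.append_assoc]

-- a full cycle starting at index |L1| increments every element and returns to index 0
theorem eLoopA_cycle (x : Int) : ∀ (L2 L1 : List Int) (b : Nat), L2 ≠ [] →
    ((L1 ++ L2).length : Int) = x →
    eLoopA (L2.length + b) (L1 ++ L2) L1.length x =
      eLoopA b (L1 ++ L2.map (· + 1)) 0 x := by
  intro L2
  induction L2 with
  | nil => intro _ _ h; exact absurd rfl h
  | cons a L2' ih =>
    intro L1 b _ hx
    simp only [List.length_append, List.length_cons] at hx
    simp only [List.length_cons]
    have hstep : L2'.length + 1 + b = (L2'.length + b) + 1 := by omega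
    rw [hstep]
    simp only [eLoopA, PySem.List.pyGet?_append_length]
    have hset : (L1 ++ a :: L2').set ((L1.length : Int)).toNat (a + 1)
        = (L1 ++ [a + 1]) ++ L2' := by
      simp [List.append_assoc]
    rw [hset]
    cases L2' with
    | nil =>
      simp only [List.length_nil] at hx
      have hx1 : (L1.length : Int) + 1 = x := by omega
      have hmod : PySem.Int.mod ((L1.length : Int) + 1) x = 0 := by
        rw [PySem.Int.mod_eq_emod_of_pos (by omega), hx1]
        simp
      rw [hmod]; simp
    | cons c L2'' =>
      simp only [List.length_cons] at hx
      have hlen : (L1.length : Int) + 1 < x := by omega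
      have hmod : PySem.Int.mod ((L1.length : Int) + 1) x = (L1.length : Int) + 1 := by
        rw [PySem.Int.mod_eq_emod_of_pos (by omega)]
        exact Int.emod_eq_of_lt (by omega) hlen
      have h1 : ((L1 ++ [a + 1]).length : Int) = (L1.length : Int) + 1 := by simp
      rw [hmod, ← h1,
        ih (L1 ++ [a + 1]) b (by simp)
          (by simp only [List.length_append, List.length_cons, List.length_nil] at hx ⊢; omega)]
      congr 1
      simp [List.append_assoc]

-- q full cycles then r extra steps on an all-c list
theorem eLoopA_main (x : Int) (hx : 0 < x) (q : Nat) : ∀ (r : Nat) (c : Int), r < x.toNat →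
    eLoopA (q * x.toNat + r) (List.replicate x.toNat c) 0 x =
      some (List.replicate r (c + q + 1) ++ List.replicate (x.toNat - r) (c + q)) := by
  induction q with
  | zero =>
    intro r c hr
    have := eLoopA_partial x r ([] : List Int) (List.replicate x.toNat c)
      (by simpa using Nat.le_of_lt hr) (by simp; omega)
    simpa [List.map_replicate, List.take_replicate, List.drop_replicate,
      Nat.min_eq_left (Nat.le_of_lt hr)] using this
  | succ q ih =>
    intro r c hr
    have hsplit : (q + 1) * x.toNat + r = (List.replicate x.toNat c).length + (q * x.toNat + r) := by
      simp; ring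
    rw [hsplit]
    have hcyc := eLoopA_cycle x (List.replicate x.toNat c) [] (q * x.toNat + r)
      (by simp; omega) (by simp; omega)
    simp only [List.nil_append, List.length_nil, Nat.cast_zero] at hcyc
    rw [hcyc, List.map_replicate, ih r (c + 1) hr]
    congr 2 <;> push_cast <;> ring_nf

theorem e_param_eq (t m s : Int) (hpre : Pre_e_param t m s) : e_param t m s = e_param_alt t m s := by
  unfold e_param e_param_alt
  by_cases hneg : t < 0
  · simp [show t + s < s from by omega, hneg]
  · simp only [hneg, if_false]
    by_cases ht0 : t = 0
    · subst ht0
      simp [eLoopA]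
    · -- t > 0, hence (by Pre_) 0 < s
      have ht : 0 < t := by omega
      have hs : 0 < s := by rcases hpre with h | h; omega; exact h
      simp only [show ¬ t + s < s from by omega, if_false, ht0]
      have hs0 : s ≠ 0 := by omega
      have hd : PySem.Int.divmod? t s =
          some (PySem.Int.floordiv t s, PySem.Int.mod t s) := by
        simp [PySem.Int.divmod?, PySem.Int.floordiv, PySem.Int.mod, hs0]
      rw [hd]
      show eLoopA (t + s - s).toNat (List.replicate s.toNat 1) 0 s =
        some (List.replicate (PySem.Int.mod t s).toNat (PySem.Int.floordiv t s + 2) ++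
          List.replicate (s - PySem.Int.mod t s).toNat (PySem.Int.floordiv t s + 1))
      rw [show t + s - s = t from by ring]
      have hfd : PySem.Int.floordiv t s = ((t.toNat / s.toNat : Nat) : Int) := by
        rw [show t = ((t.toNat : Nat) : Int) by omega, show s = ((s.toNat : Nat) : Int) by omega]
        exact PySem.Int.floordiv_natCast _ _
      have hmd : PySem.Int.mod t s = ((t.toNat % s.toNat : Nat) : Int) := by
        rw [show t = ((t.toNat : Nat) : Int) by omega, show s = ((s.toNat : Nat) : Int) by omega]
        exact PySem.Int.mod_natCast _ _
      have hfuel : t.toNat = (t.toNat / s.toNat) * s.toNat + t.toNat % s.toNat :=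
        (Nat.div_add_mod' _ _).symm
      have hrlt : t.toNat % s.toNat < s.toNat := Nat.mod_lt _ (by omega)
      rw [hfuel, eLoopA_main s (by omega) _ _ _ hrlt, hfd, hmd]
      have e1 : (((t.toNat % s.toNat : Nat) : Int)).toNat = t.toNat % s.toNat := by omega
      have e2 : (s - ((t.toNat % s.toNat : Nat) : Int)).toNat = s.toNat - t.toNat % s.toNat := by
        omega
      have e3 : (((t.toNat / s.toNat : Nat) : Int)) + 2 = 1 + ((t.toNat / s.toNat : Nat) : Int) + 1 := by ring
      have e4 : (((t.toNat / s.toNat : Nat) : Int)) + 1 = 1 + ((t.toNat / s.toNat : Nat) : Int) := by ring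
      rw [e1, e2, e3, e4]

-- ===== VERDICT (by name: the statement is the Claim_ definition above) =====
theorem e_param_spec : Claim_equal_e_param := by
  intro t m s _ hpre
  exact e_param_eq t m s hpre
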